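-- pv_equiv track=rewrite | github.com/Kaladin13/itmo_2_course | computing/lab5/src/newton.py | search_for_x0
-- ===== SOURCE A (Python) =====
-- def search_for_x0(x, point):
--     n = len(x)
--     x0 = n - 1
--     for i in range(n):
--         if point <= x[i]:
--             x0 = i - 1
--             break
--     if x0 < 0:
--         x0 = 0
--     return x0
-- ===== SOURCE B (Python) =====
-- def search_for_x0(x, point):
--     # Divide and conquer: first index with x[i] >= point via halving
--     # (left half has priority), then one interval back, clamped at 0.
--     def first_ge(xs):
--         if not xs:
--             return None
--         if len(xs) == 1:
--             return 0 if xs[0] >= point else None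
--         m = len(xs) // 2
--         l = first_ge(xs[:m])
--         if l is not None:
--             return l
--         r = first_ge(xs[m:])
--         return None if r is None else m + r
--     f = first_ge(x)
--     return max(len(x) - 1 if f is None else f - 1, 0)
-- ===== Notes on version B (the rewrite author's own statement) =====
-- stated objective: alternative
-- what changed: Replaces A's forward scan-with-break and clamp branch by a divide-and-conquer search (split in half, left half has priority) for the first node >= point, combined with a max(f-1,0) clamp.
import Mathlib
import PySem

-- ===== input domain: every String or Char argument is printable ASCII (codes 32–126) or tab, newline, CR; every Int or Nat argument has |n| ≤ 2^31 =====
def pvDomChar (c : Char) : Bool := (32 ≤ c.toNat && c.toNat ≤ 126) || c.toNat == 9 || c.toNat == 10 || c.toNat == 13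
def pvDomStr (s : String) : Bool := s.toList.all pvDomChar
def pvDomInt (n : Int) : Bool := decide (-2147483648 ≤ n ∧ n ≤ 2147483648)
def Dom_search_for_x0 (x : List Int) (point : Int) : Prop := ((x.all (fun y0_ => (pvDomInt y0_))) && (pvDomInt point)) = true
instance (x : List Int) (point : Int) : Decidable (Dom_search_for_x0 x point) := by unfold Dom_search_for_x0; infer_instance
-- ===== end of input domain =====

-- B replaces A's forward scan-with-break by a divide-and-conquer search for the
-- first node >= point (left half has priority) plus a max clamp (objective: alternative).

-- ===== PORT A =====
-- the 'for i in range(n): if point <= x[i]: x0 = i - 1; break' loop: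
-- returns some (i-1) at the first qualifying index, none if the loop completes
def aLoop (point : Int) : List Int → Int → Option Int
  | [], _ => none
  | v :: rest, i => if point ≤ v then some (i - 1) else aLoop point rest (i + 1)

def search_for_x0 (x : List Int) (point : Int) : Int :=
  let n : Int := x.length
  let x0 : Int :=
    match aLoop point x 0 with
    | some v => v
    | none => n - 1
  if x0 < 0 then 0 else x0

-- ===== PORT B =====
-- Source B's recursive helper first_ge: first index whose node is >= point,
-- found by splitting at the midpoint, the left half taking priority
def firstGe (point : Int) : List Int → Option Nat
  | [] => none
  | [v] => if v ≥ point then some 0 else none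
  | v1 :: v2 :: rest =>
      let m := (v1 :: v2 :: rest).length / 2
      match firstGe point ((v1 :: v2 :: rest).take m) with
      | some l => some l
      | none => (firstGe point ((v1 :: v2 :: rest).drop m)).map (fun r => m + r)
termination_by xs => xs.length
decreasing_by
  · simp; omega
  · simp; omega

def search_for_x0_alt (x : List Int) (point : Int) : Int :=
  match firstGe point x with
  | none => max ((x.length : Int) - 1) 0
  | some f => max ((f : Int) - 1) 0

-- ===== PRECONDITION & SPEC =====
def Spec_search_for_x0 (x : List Int) (point : Int) (out : Int) : Prop := out = search_for_x0_alt x point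
instance (x : List Int) (point : Int) (out : Int) : Decidable (Spec_search_for_x0 x point out) := by unfold Spec_search_for_x0; infer_instance

-- ===== CLAIM (what is proved, stated in full; the proofs are below) =====
def Claim_equal_search_for_x0 : Prop := ∀ (x : List Int) (point : Int), Dom_search_for_x0 x point → Spec_search_for_x0 x point (search_for_x0 x point)

-- ===== LEMMAS AND PROOFS =====

-- linear reference: first index whose node is >= point
def firstGeLin (point : Int) : List Int → Option Nat
  | [] => none
  | v :: rest => if point ≤ v then some 0 else (firstGeLin point rest).map (· + 1)

theorem aLoop_eq_firstGeLin (point : Int) (xs : List Int) (k : Int) :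
    aLoop point xs k = Option.map (fun i : Nat => k + (i : Int) - 1) (firstGeLin point xs) := by
  induction xs generalizing k with
  | nil => simp [aLoop, firstGeLin]
  | cons v rest ih =>
      simp only [aLoop, firstGeLin]
      by_cases h : point ≤ v
      · simp [h]
      · rw [if_neg h, if_neg h, ih (k + 1)]
        cases firstGeLin point rest with
        | none => simp
        | some i => simp only [Option.map_some]; congr 1; push_cast; ring

theorem firstGeLin_append (point : Int) (l r : List Int) :
    firstGeLin point (l ++ r) =
      match firstGeLin point l with
      | some i => some i
      | none => (firstGeLin point r).map (fun j => l.length + j) := by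
  induction l with
  | nil => simp [firstGeLin]
  | cons v l' ih =>
      simp only [List.cons_append, firstGeLin]
      by_cases h : point ≤ v
      · simp [h]
      · simp only [h, if_false, ih]
        cases firstGeLin point l' with
        | some i => simp
        | none =>
            cases firstGeLin point r with
            | none => simp
            | some j => simp [List.length_cons]; omega

theorem firstGe_eq_lin (point : Int) (xs : List Int) :
    firstGe point xs = firstGeLin point xs := by
  induction xs using firstGe.induct point with
  | case1 => simp [firstGe, firstGeLin]
  | case2 v h => simp [firstGe, firstGeLin, h]
  | case3 v h =>
      rw [firstGe]
      simp only [firstGeLin, ge_iff_le] at *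
      simp [h]
  | case4 v1 v2 rest m l hsome iht =>
      rw [firstGe]
      have hm : m = (v1 :: v2 :: rest).length / 2 := rfl
      rw [hm] at hsome iht
      conv_rhs => rw [← List.take_append_drop ((v1 :: v2 :: rest).length / 2) (v1 :: v2 :: rest)]
      rw [firstGeLin_append, ← iht, hsome]
  | case5 v1 v2 rest m hnone iht ihd =>
      rw [firstGe]
      have hm : m = (v1 :: v2 :: rest).length / 2 := rfl
      rw [hm] at hnone iht ihd
      conv_rhs => rw [← List.take_append_drop ((v1 :: v2 :: rest).length / 2) (v1 :: v2 :: rest)]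
      rw [firstGeLin_append, ← iht, hnone, ← ihd]
      simp [List.length_take, Nat.min_eq_left (Nat.div_le_self _ _)]

-- ===== VERDICT (by name: the statement is the Claim_ definition above) =====
theorem search_for_x0_spec : Claim_equal_search_for_x0 := by
  intro x point _
  unfold Spec_search_for_x0 search_for_x0 search_for_x0_alt
  rw [firstGe_eq_lin, aLoop_eq_firstGeLin]
  cases firstGeLin point x with
  | none =>
      simp only [Option.map_none, max_def]
      split_ifs <;> omega
  | some f =>
      simp only [Option.map_some, max_def]
      split_ifs <;> omega
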